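-- pv_equiv track=rewrite | github.com/n0Oo0Oo0b/advent-of-code | 2015/day24.py | find_arrangement
-- ===== SOURCE A (Python) =====
-- from itertools import combinations
-- import math
--
-- def find_arrangement(data, compartments):
--     target = sum(data) // compartments
--     for n in range(1, len(data)):
--         possible = []
--         if sum(data[-n:]) < target:
--             continue
--         for c in combinations(data, n):
--             if sum(c) == target:
--                 possible.append(c)
--         if possible:
--             # Apparently you don't have to check that the combination
--             # can divide the remaining presents correctly
--             return min(map(math.prod, possible))
-- ===== SOURCE B (Python) =====
-- def find_arrangement(data, compartments):
--     target = sum(data) // compartments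
--
--     # mm(i, n, s): (min, max) product over n-element subsets of data[i:]
--     # summing to s, or None if there is no such subset.
--     def mm(i, n, s):
--         if n == 0:
--             return (1, 1) if s == 0 else None
--         if i == len(data):
--             return None
--         x = data[i]
--         rest = mm(i + 1, n - 1, s - x)
--         best = mm(i + 1, n, s)
--         if rest is None:
--             return best
--         lo, hi = rest
--         cand = (x * lo, x * hi) if x >= 0 else (x * hi, x * lo)
--         if best is None:
--             return cand
--         return (min(cand[0], best[0]), max(cand[1], best[1]))
--
--     for n in range(1, len(data)):
--         if sum(data[-n:]) < target:
--             continue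
--         r = mm(0, n, target)
--         if r is not None:
--             return r[0]
-- ===== Notes on version B (the rewrite author's own statement) =====
-- stated objective: alternative
-- what changed: Replaces the per-size materialisation of all itertools.combinations tuples (filter by sum, then min of products) with a recursive include/exclude subset-sum search that carries the (min,max) product pair directly and never builds any subset; the outer size loop and its suffix-sum skip are kept as they determine the returned size.
import Mathlib
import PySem

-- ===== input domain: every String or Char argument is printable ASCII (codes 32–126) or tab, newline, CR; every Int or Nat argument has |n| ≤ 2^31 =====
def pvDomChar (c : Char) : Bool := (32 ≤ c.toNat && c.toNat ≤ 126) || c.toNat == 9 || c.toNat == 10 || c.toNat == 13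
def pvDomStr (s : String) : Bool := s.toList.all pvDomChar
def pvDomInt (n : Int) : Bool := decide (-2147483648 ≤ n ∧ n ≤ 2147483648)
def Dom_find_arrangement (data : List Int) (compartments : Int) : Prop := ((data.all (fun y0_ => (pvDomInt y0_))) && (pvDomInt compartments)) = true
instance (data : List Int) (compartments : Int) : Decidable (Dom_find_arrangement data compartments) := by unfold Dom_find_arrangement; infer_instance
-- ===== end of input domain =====

-- B replaces A's per-size enumeration of all combinations by a recursive include/exclude
-- subset-sum search carrying the (min,max) product pair; same outer size loop, same result.

-- ===== PORT A =====

-- itertools.combinations(data, n), in itertools' lexicographic-by-index order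
def combosA : List Int → Nat → List (List Int)
  | _, 0 => [[]]
  | [], _ + 1 => []
  | x :: xs, n + 1 => (combosA xs n).map (fun c => x :: c) ++ combosA xs (n + 1)

-- math.prod(c)
def prodA (c : List Int) : Int := c.foldl (· * ·) 1

-- the body of A's 'for n in range(1, len(data))' loop (early return = Option)
def loopA (data : List Int) (target : Int) : List Int → Option Int
  | [] => none
  | n :: rest =>
    if (PySem.List.slice data (some (-n)) none).sum < target then
      loopA data target rest
    else
      -- 'for c in combinations(data, n): if sum(c) == target: possible.append(c)'
      let possible := (combosA data n.toNat).foldl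
        (fun acc c => if c.sum == target then acc ++ [c] else acc) []
      if possible.isEmpty then loopA data target rest
      else PySem.List.min? (possible.map prodA) (fun y => y)

def find_arrangement (data : List Int) (compartments : Int) : Option Int :=
  let target := PySem.Int.floordiv data.sum compartments
  loopA data target (PySem.List.pyRange 1 data.length 1)

-- ===== PORT B =====

-- mm(i, n, s) of Source B, recursing on the suffix data[i:]
def mmB : List Int → Nat → Int → Option (Int × Int)
  | _, 0, s => if s == 0 then some (1, 1) else none
  | [], _ + 1, _ => none
  | x :: xs, n + 1, s =>
    let rest := mmB xs n (s - x)
    let best := mmB xs (n + 1) s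
    match rest with
    | none => best
    | some (lo, hi) =>
      let cand := if 0 ≤ x then (x * lo, x * hi) else (x * hi, x * lo)
      match best with
      | none => some cand
      | some (blo, bhi) => some (min cand.1 blo, max cand.2 bhi)

def loopB (data : List Int) (target : Int) : List Int → Option Int
  | [] => none
  | n :: rest =>
    if (PySem.List.slice data (some (-n)) none).sum < target then
      loopB data target rest
    else
      match mmB data n.toNat target with
      | some (lo, _) => some lo
      | none => loopB data target rest

def find_arrangement_alt (data : List Int) (compartments : Int) : Option Int :=
  let target := PySem.Int.floordiv data.sum compartments
  loopB data target (PySem.List.pyRange 1 data.length 1)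

-- ===== PRECONDITION & SPEC =====
-- Pre_ excludes only compartments = 0, on which Python A raises ZeroDivisionError.
def Pre_find_arrangement (data : List Int) (compartments : Int) : Prop := compartments ≠ 0
instance (data : List Int) (compartments : Int) : Decidable (Pre_find_arrangement data compartments) := by
  unfold Pre_find_arrangement; infer_instance

def pvWitness_find_arrangement : List Int × Int := ([1, 2, 3], 3)

def Spec_find_arrangement (data : List Int) (compartments : Int) (out : Option Int) : Prop := out = find_arrangement_alt data compartments
instance (data : List Int) (compartments : Int) (out : Option Int) : Decidable (Spec_find_arrangement data compartments out) := by unfold Spec_find_arrangement; infer_instance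

-- ===== CLAIM (what is proved, stated in full; the proofs are below) =====
def Claim_equal_find_arrangement : Prop := ∀ (data : List Int) (compartments : Int), Dom_find_arrangement data compartments → Pre_find_arrangement data compartments → Spec_find_arrangement data compartments (find_arrangement data compartments)

-- ===== LEMMAS AND PROOFS =====

-- (min, max) of a list of Ints, as an Option pair
def pack : List Int → Option (Int × Int)
  | [] => none
  | a :: l =>
    match pack l with
    | none => some (a, a)
    | some (lo, hi) => some (min a lo, max a hi)

def pmerge : Option (Int × Int) → Option (Int × Int) → Option (Int × Int)
  | none, b => b
  | some p, none => some p
  | some (a, b), some (c, d) => some (min a c, max b d)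

theorem pack_append (l₁ l₂ : List Int) : pack (l₁ ++ l₂) = pmerge (pack l₁) (pack l₂) := by
  induction l₁ with
  | nil => cases h : pack l₂ <;> simp [pack, pmerge, h]
  | cons a l₁ ih =>
    simp only [List.cons_append, pack, ih]
    cases h₁ : pack l₁ with
    | none =>
      cases h₂ : pack l₂ <;> simp [pmerge]
    | some p₁ =>
      obtain ⟨lo₁, hi₁⟩ := p₁
      cases h₂ : pack l₂ with
      | none => simp [pmerge]
      | some p₂ =>
        obtain ⟨lo₂, hi₂⟩ := p₂
        simp [pmerge, min_assoc, max_assoc]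

theorem min_mul_nonneg (x a b : Int) (hx : 0 ≤ x) : min (x * a) (x * b) = x * min a b := by
  rcases le_total a b with h | h
  · rw [min_eq_left h, min_eq_left (mul_le_mul_of_nonneg_left h hx)]
  · rw [min_eq_right h, min_eq_right (mul_le_mul_of_nonneg_left h hx)]

theorem max_mul_nonneg (x a b : Int) (hx : 0 ≤ x) : max (x * a) (x * b) = x * max a b := by
  rcases le_total a b with h | h
  · rw [max_eq_right h, max_eq_right (mul_le_mul_of_nonneg_left h hx)]
  · rw [max_eq_left h, max_eq_left (mul_le_mul_of_nonneg_left h hx)]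

theorem min_mul_nonpos (x a b : Int) (hx : x ≤ 0) : min (x * a) (x * b) = x * max a b := by
  rcases le_total a b with h | h
  · rw [max_eq_right h, min_eq_right (mul_le_mul_of_nonpos_left h hx)]
  · rw [max_eq_left h, min_eq_left (mul_le_mul_of_nonpos_left h hx)]

theorem max_mul_nonpos (x a b : Int) (hx : x ≤ 0) : max (x * a) (x * b) = x * min a b := by
  rcases le_total a b with h | h
  · rw [min_eq_left h, max_eq_left (mul_le_mul_of_nonpos_left h hx)]
  · rw [min_eq_right h, max_eq_right (mul_le_mul_of_nonpos_left h hx)]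

theorem pack_map_mul (x : Int) (l : List Int) :
    pack (l.map (fun t => x * t)) =
      (pack l).map (fun p => if 0 ≤ x then (x * p.1, x * p.2) else (x * p.2, x * p.1)) := by
  induction l with
  | nil => simp [pack]
  | cons a l ih =>
    simp only [List.map_cons, pack, ih]
    cases h : pack l with
    | none => by_cases hx : 0 ≤ x <;> simp [hx]
    | some p =>
      obtain ⟨lo, hi⟩ := p
      by_cases hx : 0 ≤ x
      · simp [hx, min_mul_nonneg x a lo hx, max_mul_nonneg x a hi hx]
      · simp [hx, min_mul_nonpos x a hi (by omega), max_mul_nonpos x a lo (by omega)]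

theorem foldl_mul_shift (l : List Int) : ∀ a : Int, l.foldl (· * ·) a = a * l.foldl (· * ·) 1 := by
  induction l with
  | nil => intro a; simp
  | cons y l ih =>
    intro a
    simp only [List.foldl_cons]
    rw [ih (a * y), ih (1 * y)]
    ring

theorem prodA_cons (x : Int) (c : List Int) : prodA (x :: c) = x * prodA c := by
  simp only [prodA, List.foldl_cons]
  rw [foldl_mul_shift c (1 * x), foldl_mul_shift c 1]
  ring

-- the heart: mmB computes the (min, max) products over A's filtered combinations
theorem mmB_pack (xs : List Int) : ∀ (n : Nat) (s : Int),
    mmB xs n s = pack (((combosA xs n).filter (fun c => c.sum == s)).map prodA) := by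
  induction xs with
  | nil =>
    intro n s
    match n with
    | 0 =>
      have h1 : mmB ([] : List Int) 0 s = if s == 0 then some (1, 1) else none := rfl
      have h2 : combosA ([] : List Int) 0 = [[]] := rfl
      rw [h1, h2]
      by_cases h : s = 0
      · simp [h, pack, prodA, List.filter]
      · simp [pack, List.filter, h, show ((0 : Int) == s) = false from by simp [Ne.symm h]]
    | n + 1 => simp [mmB, combosA, pack]
  | cons x xs ih =>
    intro n s
    match n with
    | 0 =>
      have h1 : mmB (x :: xs) 0 s = if s == 0 then some (1, 1) else none := rfl
      have h2 : combosA (x :: xs) 0 = [[]] := rfl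
      rw [h1, h2]
      by_cases h : s = 0
      · simp [h, pack, prodA, List.filter]
      · simp [pack, List.filter, h, show ((0 : Int) == s) = false from by simp [Ne.symm h]]
    | n + 1 =>
      have hfilter :
          ((combosA xs n).map (fun c => x :: c)).filter (fun c => c.sum == s) =
            ((combosA xs n).filter (fun c => c.sum == s - x)).map (fun c => x :: c) := by
        rw [List.filter_map]
        congr 1
        apply List.filter_congr
        intro c _
        show ((x :: c).sum == s) = (c.sum == s - x)
        by_cases hc : c.sum = s - x <;> simp [List.sum_cons, hc] <;> omega
      have hmap :
          (((combosA xs n).filter (fun c => c.sum == s - x)).map (fun c => x :: c)).map prodA =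
            (((combosA xs n).filter (fun c => c.sum == s - x)).map prodA).map (fun t => x * t) := by
        simp only [List.map_map]
        apply List.map_congr_left
        intro c _
        exact prodA_cons x c
      show mmB (x :: xs) (n + 1) s = _
      rw [show combosA (x :: xs) (n + 1)
            = (combosA xs n).map (fun c => x :: c) ++ combosA xs (n + 1) from rfl]
      rw [List.filter_append, List.map_append, pack_append, hfilter, hmap, pack_map_mul]
      rw [← ih n (s - x), ← ih (n + 1) s]
      show (match mmB xs n (s - x) with
            | none => mmB xs (n + 1) s
            | some (lo, hi) =>
              let cand := if 0 ≤ x then (x * lo, x * hi) else (x * hi, x * lo)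
              match mmB xs (n + 1) s with
              | none => some cand
              | some (blo, bhi) => some (min cand.1 blo, max cand.2 bhi)) = _
      cases hr : mmB xs n (s - x) with
      | none => cases hb : mmB xs (n + 1) s <;> simp [pmerge]
      | some p =>
        obtain ⟨lo, hi⟩ := p
        cases hb : mmB xs (n + 1) s with
        | none => by_cases hx : 0 ≤ x <;> simp [pmerge, hx]
        | some q =>
          obtain ⟨blo, bhi⟩ := q
          by_cases hx : 0 ≤ x <;> simp [pmerge, hx]

theorem foldl_min_shift (l : List Int) : ∀ a b : Int, min a (l.foldl min b) = l.foldl min (min a b) := by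
  induction l with
  | nil => intro a b; rfl
  | cons c l ih =>
    intro a b
    simp only [List.foldl_cons]
    rw [ih a (min b c), min_assoc]

theorem foldl_max_shift (l : List Int) : ∀ a b : Int, max a (l.foldl max b) = l.foldl max (max a b) := by
  induction l with
  | nil => intro a b; rfl
  | cons c l ih =>
    intro a b
    simp only [List.foldl_cons]
    rw [ih a (max b c), max_assoc]

theorem pack_cons_eq (l : List Int) : ∀ a : Int, pack (a :: l) = some (l.foldl min a, l.foldl max a) := by
  induction l with
  | nil => intro a; rfl
  | cons b l ih =>
    intro a
    show (match pack (b :: l) with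
          | none => some (a, a)
          | some (lo, hi) => some (min a lo, max a hi)) = _
    rw [ih b]
    simp only [List.foldl_cons]
    rw [foldl_min_shift l a b, foldl_max_shift l a b]

theorem loop_eq (data : List Int) (target : Int) : ∀ ns : List Int,
    loopA data target ns = loopB data target ns := by
  intro ns
  induction ns with
  | nil => rfl
  | cons n rest ih =>
    show loopA data target (n :: rest) = loopB data target (n :: rest)
    rw [loopA, loopB]
    by_cases hg : (PySem.List.slice data (some (-n)) none).sum < target
    · simp [hg, ih]
    · simp only [hg, if_false]
      rw [PySem.List.foldl_append_if_eq_filter]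
      rw [mmB_pack data n.toNat target]
      cases hK : (combosA data n.toNat).filter (fun c => c.sum == target) with
      | nil => simpa [pack] using ih
      | cons c K' =>
        simp only [List.nil_append, List.isEmpty_cons, List.map_cons]
        rw [pack_cons_eq (K'.map prodA) (prodA c)]
        rw [PySem.List.min?_id_cons]
        simp

theorem find_arrangement_spec : Claim_equal_find_arrangement := by
  intro data compartments _ _
  unfold Spec_find_arrangement find_arrangement find_arrangement_alt
  exact loop_eq data _ _

-- ===== VERDICT (by name: the statement is the Claim_ definition above) =====
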